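-- pv_equiv track=rewrite | github.com/aleiepure/devtoolbox | src/services/text_inspector.py | _snake_constant_kebab_cobol_converter
-- ===== SOURCE A (Python) =====
-- def _snake_constant_kebab_cobol_converter(text:str, space_replacement:str, upper_case:bool):
--     ignore_next_non_alnum = True
--     output = ""
--
--     for i in range(0, len(text)):
--         if text[i].isalnum():
--             ignore_next_non_alnum = False
--             if upper_case:
--                 output += text[i].upper()
--             else:
--                 output += text[i].lower()
--         elif text[i] == "\n":
--             ignore_next_non_alnum = True
--             output += text[i]
--         elif not ignore_next_non_alnum:
--             if i < len(text)-1 and text[i+1].isalnum():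
--                 ignore_next_non_alnum = True
--                 output += space_replacement
--
--     return output
-- ===== SOURCE B (Python) =====
-- def _snake_constant_kebab_cobol_converter(text: str, space_replacement: str, upper_case: bool):
--     out_lines = []
--     for line in text.split('\n'):
--         words = []
--         cur = ""
--         for ch in line:
--             if ch.isalnum():
--                 cur += ch.upper() if upper_case else ch.lower()
--             elif cur:
--                 words.append(cur)
--                 cur = ""
--         if cur:
--             words.append(cur)
--         out_lines.append(space_replacement.join(words))
--     return '\n'.join(out_lines)
-- ===== Notes on version B (the rewrite author's own statement) =====
-- stated objective: simpler
-- what changed: Replaces A's single stateful scan (ignore_next_non_alnum flag plus text[i+1] lookahead deciding where to emit a separator) by a flag-free decomposition: split the text into lines, group each line's maximal alnum runs into case-folded words, join words with space_replacement and lines with '\n'.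
import Mathlib
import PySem

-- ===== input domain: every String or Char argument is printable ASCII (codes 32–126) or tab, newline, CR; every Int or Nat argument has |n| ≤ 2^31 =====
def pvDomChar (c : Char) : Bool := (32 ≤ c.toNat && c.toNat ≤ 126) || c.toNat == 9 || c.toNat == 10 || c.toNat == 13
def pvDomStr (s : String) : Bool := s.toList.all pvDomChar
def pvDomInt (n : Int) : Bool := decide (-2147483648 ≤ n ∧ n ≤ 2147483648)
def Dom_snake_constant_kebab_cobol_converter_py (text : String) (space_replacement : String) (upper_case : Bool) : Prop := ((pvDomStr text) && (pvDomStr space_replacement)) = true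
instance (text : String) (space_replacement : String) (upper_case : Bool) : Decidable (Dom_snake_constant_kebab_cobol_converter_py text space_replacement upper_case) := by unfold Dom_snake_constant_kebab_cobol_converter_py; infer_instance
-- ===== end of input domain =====

-- B re-decomposes A's single stateful scan (ignore-flag + one-char lookahead) as: split into
-- lines, group each line's maximal alnum runs into case-folded words, join words with the
-- separator and lines with '\n' — same return value, simpler decomposition (objective: simpler).

-- ===== PORT A =====
-- the for-loop over text; state = (ignore_next_non_alnum, output); 'i < len(text)-1 and
-- text[i+1].isalnum()' is read off the head of the remaining characters
def pvALoop (space_replacement : List Char) (upper_case : Bool) : Bool → List Char → List Char → List Char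
  | _, output, [] => output
  | ign, output, c :: rest =>
    if PySem.Chars.isalnum c then
      pvALoop space_replacement upper_case false
        (output ++ [if upper_case then PySem.Chars.upperChar c else PySem.Chars.lowerChar c]) rest
    else if c = '\n' then
      pvALoop space_replacement upper_case true (output ++ [c]) rest
    else if !ign then
      (if (match rest with | d :: _ => PySem.Chars.isalnum d | [] => false) then
        pvALoop space_replacement upper_case true (output ++ space_replacement) rest
      else
        pvALoop space_replacement upper_case ign output rest)
    else
      pvALoop space_replacement upper_case ign output rest

def snake_constant_kebab_cobol_converter_py (text : String) (space_replacement : String) (upper_case : Bool) : String :=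
  String.mk (pvALoop space_replacement.toList upper_case true [] text.toList)

-- ===== PORT B =====
-- per-line word accumulator: state = (words, cur); Python's 'elif cur:' is the nonempty test
def pvBStep (upper_case : Bool) (st : List (List Char) × List Char) (c : Char) : List (List Char) × List Char :=
  if PySem.Chars.isalnum c then
    (st.1, st.2 ++ [if upper_case then PySem.Chars.upperChar c else PySem.Chars.lowerChar c])
  else if st.2 ≠ [] then (st.1 ++ [st.2], [])
  else st

def pvLineWords (upper_case : Bool) (line : List Char) : List (List Char) :=
  let st := line.foldl (pvBStep upper_case) ([], [])
  if st.2 ≠ [] then st.1 ++ [st.2] else st.1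

-- space_replacement.join(words)
def pvProcLine (space_replacement : List Char) (upper_case : Bool) (line : List Char) : List Char :=
  List.intercalate space_replacement (pvLineWords upper_case line)

def snake_constant_kebab_cobol_converter_py_alt (text : String) (space_replacement : String) (upper_case : Bool) : String :=
  String.mk (List.intercalate ['\n']
    (((text.toList).splitOn '\n').map (pvProcLine space_replacement.toList upper_case)))

-- ===== PRECONDITION & SPEC =====
def Spec_snake_constant_kebab_cobol_converter_py (text : String) (space_replacement : String) (upper_case : Bool) (out : String) : Prop := out = snake_constant_kebab_cobol_converter_py_alt text space_replacement upper_case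
instance (text : String) (space_replacement : String) (upper_case : Bool) (out : String) : Decidable (Spec_snake_constant_kebab_cobol_converter_py text space_replacement upper_case out) := by unfold Spec_snake_constant_kebab_cobol_converter_py; infer_instance

-- ===== CLAIM (what is proved, stated in full; the proofs are below) =====
def Claim_equal_snake_constant_kebab_cobol_converter_py : Prop := ∀ (text : String) (space_replacement : String) (upper_case : Bool), Dom_snake_constant_kebab_cobol_converter_py text space_replacement upper_case → Spec_snake_constant_kebab_cobol_converter_py text space_replacement upper_case (snake_constant_kebab_cobol_converter_py text space_replacement upper_case)

-- ===== LEMMAS AND PROOFS =====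

-- A's loop without the output accumulator
def pvAux (rep : List Char) (uc : Bool) : Bool → List Char → List Char
  | _, [] => []
  | ign, c :: rest =>
    if PySem.Chars.isalnum c then
      (if uc then PySem.Chars.upperChar c else PySem.Chars.lowerChar c) :: pvAux rep uc false rest
    else if c = '\n' then c :: pvAux rep uc true rest
    else if !ign then
      (if (match rest with | d :: _ => PySem.Chars.isalnum d | [] => false) then
        rep ++ pvAux rep uc true rest
      else pvAux rep uc ign rest)
    else pvAux rep uc ign rest

theorem pvALoop_eq_aux (rep : List Char) (uc : Bool) :
    ∀ (cs : List Char) (ign : Bool) (out : List Char),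
      pvALoop rep uc ign out cs = out ++ pvAux rep uc ign cs := by
  intro cs
  induction cs with
  | nil => intro ign out; simp [pvALoop, pvAux]
  | cons c rest ih =>
    intro ign out
    simp only [pvALoop, pvAux]
    split_ifs <;> simp [ih]

-- does A emit a separator before re-syncing, starting in state ignore=False?
def pvNeedSep : List Char → Bool
  | [] => false
  | c :: rest =>
    if PySem.Chars.isalnum c then false
    else if c = '\n' then false
    else ((match rest with | d :: _ => PySem.Chars.isalnum d | [] => false) || pvNeedSep rest)

theorem pvAux_false (rep : List Char) (uc : Bool) :
    ∀ cs : List Char,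
      pvAux rep uc false cs = (if pvNeedSep cs then rep else []) ++ pvAux rep uc true cs := by
  intro cs
  induction cs with
  | nil => simp [pvAux, pvNeedSep]
  | cons c rest ih =>
    by_cases h1 : PySem.Chars.isalnum c = true
    · simp [pvAux, pvNeedSep, h1]
    · by_cases h2 : c = '\n'
      · simp [pvAux, pvNeedSep, h1, h2]
      · cases hh : (match rest with | d :: _ => PySem.Chars.isalnum d | [] => false) with
        | true => simp [pvAux, pvNeedSep, h1, h2, hh]
        | false => simp [pvAux, pvNeedSep, h1, h2, hh, ih]

-- B's foldl word accumulator, recursively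
def pvWcont (uc : Bool) : List Char → List Char → List (List Char)
  | cur, [] => if cur ≠ [] then [cur] else []
  | cur, c :: rest =>
    if PySem.Chars.isalnum c then
      pvWcont uc (cur ++ [if uc then PySem.Chars.upperChar c else PySem.Chars.lowerChar c]) rest
    else if cur ≠ [] then cur :: pvWcont uc [] rest
    else pvWcont uc [] rest

theorem pvFoldl_eq_wcont (uc : Bool) :
    ∀ (line : List Char) (ws : List (List Char)) (cur : List Char),
      (let st := line.foldl (pvBStep uc) (ws, cur);
       if st.2 ≠ [] then st.1 ++ [st.2] else st.1) = ws ++ pvWcont uc cur line := by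
  intro line
  induction line with
  | nil =>
    intro ws cur
    simp only [List.foldl_nil, pvWcont]
    split_ifs <;> simp
  | cons c rest ih =>
    intro ws cur
    simp only [List.foldl_cons]
    by_cases h1 : PySem.Chars.isalnum c = true
    · rw [show pvBStep uc (ws, cur) c =
          (ws, cur ++ [if uc then PySem.Chars.upperChar c else PySem.Chars.lowerChar c]) by
        simp [pvBStep, h1]]
      rw [ih]
      simp [pvWcont, h1]
    · by_cases h2 : cur = []
      · rw [show pvBStep uc (ws, cur) c = (ws, cur) by simp [pvBStep, h1, h2]]
        rw [ih]
        simp [pvWcont, h1, h2]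
      · rw [show pvBStep uc (ws, cur) c = (ws ++ [cur], []) by simp [pvBStep, h1, h2]]
        rw [ih]
        simp [pvWcont, h1, h2]

theorem pvLineWords_eq (uc : Bool) (line : List Char) :
    pvLineWords uc line = pvWcont uc [] line := by
  have := pvFoldl_eq_wcont uc line [] []
  simpa [pvLineWords] using this

theorem pvWcont_ne_nil (uc : Bool) :
    ∀ (cs cur : List Char), cur ≠ [] → pvWcont uc cur cs ≠ [] := by
  intro cs
  induction cs with
  | nil => intro cur h; simp [pvWcont, h]
  | cons c rest ih =>
    intro cur h
    simp only [pvWcont]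
    by_cases h1 : PySem.Chars.isalnum c = true
    · rw [if_pos h1]; exact ih _ (by simp)
    · rw [if_neg (by simp [h1]), if_pos h]; simp

def pvHasAl (cs : List Char) : Bool := cs.any PySem.Chars.isalnum

theorem pvWcont_nil_eq_nil_iff (uc : Bool) :
    ∀ cs : List Char, pvWcont uc [] cs = [] ↔ pvHasAl cs = false := by
  intro cs
  induction cs with
  | nil => simp [pvWcont, pvHasAl]
  | cons c rest ih =>
    simp only [pvWcont, pvHasAl, List.any_cons]
    by_cases h1 : PySem.Chars.isalnum c = true
    · simp only [h1, if_pos, Bool.true_or]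
      constructor
      · intro h; exact absurd h (pvWcont_ne_nil uc rest _ (by simp))
      · intro h; simp at h
    · simp [h1, pvHasAl] at ih ⊢; exact ih

-- intercalate over a cons
theorem pvIntercalate_cons {α : Type} (sep a : List α) (l : List (List α)) :
    List.intercalate sep (a :: l) =
      a ++ (match l with | [] => [] | _ :: _ => sep ++ List.intercalate sep l) := by
  cases l <;> simp [List.intercalate, List.intersperse]

-- rendering of the rest of a line while inside a word
def pvTail (rep : List Char) (uc : Bool) : List Char → List Char
  | [] => []
  | d :: r =>
    if PySem.Chars.isalnum d then
      (if uc then PySem.Chars.upperChar d else PySem.Chars.lowerChar d) :: pvTail rep uc r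
    else if pvHasAl r then rep ++ List.intercalate rep (pvWcont uc [] r)
    else []

theorem pvIntercalate_wcont (rep : List Char) (uc : Bool) :
    ∀ (cs cur : List Char), cur ≠ [] →
      List.intercalate rep (pvWcont uc cur cs) = cur ++ pvTail rep uc cs := by
  intro cs
  induction cs with
  | nil => intro cur h; simp [pvWcont, pvTail, h, pvIntercalate_cons]
  | cons c rest ih =>
    intro cur h
    simp only [pvWcont, pvTail]
    by_cases h1 : PySem.Chars.isalnum c = true
    · simp only [h1, if_pos]
      rw [ih _ (by simp)]; simp
    · simp only [h1, Bool.false_eq_true, if_false, if_neg, h, ne_eq, not_true_eq_false,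
        not_false_eq_true, if_pos]
      cases hA : pvHasAl rest with
      | false =>
        have : pvWcont uc [] rest = [] := (pvWcont_nil_eq_nil_iff uc rest).mpr hA
        simp [this, pvIntercalate_cons]
      | true =>
        have hne : pvWcont uc [] rest ≠ [] := by
          intro hc; rw [(pvWcont_nil_eq_nil_iff uc rest).mp hc] at hA; cases hA
        obtain ⟨b, l, hb⟩ := List.exists_cons_of_ne_nil hne
        simp [hb, pvIntercalate_cons]

-- separator need, read off the line alone (h is newline-free as a head of splitOn)
def pvNeedSepL (h : List Char) : Bool :=
  match h with
  | [] => false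
  | d :: r => !PySem.Chars.isalnum d && pvHasAl r

theorem pvTail_eq (rep : List Char) (uc : Bool) :
    ∀ h : List Char,
      pvTail rep uc h = (if pvNeedSepL h then rep else []) ++ List.intercalate rep (pvWcont uc [] h) := by
  intro h
  induction h with
  | nil => simp [pvTail, pvNeedSepL, pvWcont, List.intercalate]
  | cons d r ih =>
    by_cases h1 : PySem.Chars.isalnum d = true
    · simp only [pvTail, pvNeedSepL, pvWcont, h1, if_pos, Bool.not_true, Bool.false_and,
        Bool.false_eq_true, if_false, List.nil_append]
      rw [pvIntercalate_wcont rep uc r _ (by simp)]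
      simp
    · simp only [pvTail, pvNeedSepL, pvWcont, h1, Bool.false_eq_true, if_false,
        Bool.not_false, Bool.true_and]
      cases hA : pvHasAl r with
      | false =>
        have : pvWcont uc [] r = [] := (pvWcont_nil_eq_nil_iff uc r).mpr hA
        simp [this, List.intercalate]
      | true => simp

-- pvNeedSep depends only on the current line
theorem pvNeedSep_eq_line :
    ∀ cs : List Char, pvNeedSep cs = pvNeedSepL (cs.takeWhile (· != '\n')) := by
  intro cs
  induction cs with
  | nil => simp [pvNeedSep, pvNeedSepL]
  | cons c rest ih =>
    by_cases h2 : c = '\n'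
    · simp [pvNeedSep, pvNeedSepL, h2, List.takeWhile_cons,
        show PySem.Chars.isalnum '\n' = false by decide]
    · rw [List.takeWhile_cons, if_pos (by simp [h2])]
      by_cases h1 : PySem.Chars.isalnum c = true
      · simp [pvNeedSep, pvNeedSepL, h1, h2]
      · simp only [pvNeedSep, pvNeedSepL, h1, Bool.false_eq_true, if_false, h2, if_neg,
          Bool.not_eq_true', Bool.true_and, Bool.not_false]
        -- goal: alnumHead rest || pvNeedSep rest = pvHasAl (takeWhile rest)
        cases rest with
        | nil => simp [pvNeedSep, pvHasAl]
        | cons e r2 =>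
          by_cases h4 : e = '\n'
          · simp [pvNeedSep, pvHasAl, h4, List.takeWhile_cons,
              show PySem.Chars.isalnum '\n' = false by decide]
          · rw [ih]
            rw [List.takeWhile_cons, if_pos (by simp [h4])]
            by_cases h3 : PySem.Chars.isalnum e = true
            · simp [h3, pvNeedSepL, pvHasAl]
            · simp [h3, pvNeedSepL, pvHasAl, pvNeedSep, h4]

-- head of splitOn is takeWhile
theorem pvSplitOn_head :
    ∀ (cs h : List Char) (t : List (List Char)),
      cs.splitOn '\n' = h :: t → h = cs.takeWhile (· != '\n') := by
  intro cs
  induction cs with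
  | nil => intro h t hs; simp [List.splitOn, List.splitOnP_nil] at hs; simp [hs.1]
  | cons c rest ih =>
    intro h t hs
    by_cases h2 : c = '\n'
    · simp [List.splitOn, List.splitOnP_cons, h2] at hs
      simp [hs.1, List.takeWhile_cons, h2]
    · obtain ⟨h', t', hht⟩ := List.exists_cons_of_ne_nil (List.splitOnP_ne_nil (· == '\n') rest)
      simp [List.splitOn, List.splitOnP_cons, h2, hht] at hs
      have := ih h' t' (by simp [List.splitOn, hht])
      simp [List.takeWhile_cons, h2, ← hs.1, this]

-- main: A's scan (state True) equals B's per-line rendering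
theorem pvMain (rep : List Char) (uc : Bool) :
    ∀ cs : List Char,
      pvAux rep uc true cs =
        List.intercalate ['\n'] ((cs.splitOn '\n').map (pvProcLine rep uc)) := by
  intro cs
  induction cs with
  | nil =>
    simp [pvAux, List.splitOn, List.splitOnP_nil, pvProcLine, pvLineWords, pvBStep,
      List.intercalate]
  | cons c rest ih =>
    obtain ⟨h, t, hht⟩ := List.exists_cons_of_ne_nil (List.splitOnP_ne_nil (· == '\n') rest)
    have hsp : rest.splitOn '\n' = h :: t := by simp [List.splitOn, hht]
    by_cases h2 : c = '\n'
    · subst h2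
      have hstep : pvAux rep uc true ('\n' :: rest) = '\n' :: pvAux rep uc true rest := by
        simp only [pvAux]
        rw [if_neg (by decide)]
        simp
      rw [hstep, ih]
      have hsplit : ('\n' :: rest).splitOn '\n' = [] :: h :: t := by
        simp [List.splitOn, List.splitOnP_cons, hht]
      rw [hsplit, List.map_cons, pvIntercalate_cons]
      have hp : pvProcLine rep uc [] = [] := by
        simp [pvProcLine, pvLineWords, List.intercalate]
      simp [hp, hsp]
    · have hbe : (c == '\n') = false := by simp [h2]
      have hmod : (c :: rest).splitOn '\n' = (c :: h) :: t := by
        simp [List.splitOn, List.splitOnP_cons, hbe, hht]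
      have hhead : h = rest.takeWhile (· != '\n') := pvSplitOn_head rest h t hsp
      -- common reduction of both intercalates
      rw [hmod, List.map_cons, pvIntercalate_cons]
      have hproc : pvProcLine rep uc (c :: h) =
          (if PySem.Chars.isalnum c then
            ((if uc then PySem.Chars.upperChar c else PySem.Chars.lowerChar c) ::
              ((if pvNeedSepL h then rep else []) ++ pvProcLine rep uc h))
          else pvProcLine rep uc h) := by
        by_cases h1 : PySem.Chars.isalnum c = true
        · simp only [h1, if_pos, pvProcLine, pvLineWords_eq, pvWcont, ne_eq,
            not_true_eq_false, if_neg]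
          rw [pvIntercalate_wcont rep uc h _ (by simp)]
          rw [pvTail_eq]
          simp
        · simp only [h1, Bool.false_eq_true, if_false, pvProcLine, pvLineWords_eq]
          rw [show pvWcont uc [] (c :: h) = pvWcont uc [] h by simp [pvWcont, h1]]
      by_cases h1 : PySem.Chars.isalnum c = true
      · simp only [pvAux, h1, if_pos]
        rw [pvAux_false, ih, hsp, List.map_cons, pvIntercalate_cons, hproc]
        simp only [h1, if_pos]
        rw [pvNeedSep_eq_line, ← hhead]
        simp
      · simp only [pvAux, h1, Bool.false_eq_true, if_false, h2, if_neg, Bool.not_true,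
          if_pos]
        rw [ih, hsp, List.map_cons, pvIntercalate_cons, hproc]
        simp [h1]

-- ===== VERDICT (by name: the statement is the Claim_ definition above) =====
theorem snake_constant_kebab_cobol_converter_py_spec : Claim_equal_snake_constant_kebab_cobol_converter_py := by
  intro text space_replacement upper_case _
  unfold Spec_snake_constant_kebab_cobol_converter_py
  unfold snake_constant_kebab_cobol_converter_py snake_constant_kebab_cobol_converter_py_alt
  rw [pvALoop_eq_aux, pvMain]
  simp
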